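-- pv_equiv track=rewrite | github.com/abdelrahman-mos/nongram-backtracking | main.py | rows_violated
-- ===== SOURCE A (Python) =====
-- def rows_violated(state, rows):
--     for i, curr_row in enumerate(state):
--         curr_row_conditions = rows[i]
--         if sum(curr_row) > sum(curr_row_conditions):
--             return True
--
--         start_idx = 0
--         for j in curr_row_conditions:
--             total_sum = 0
--             for k in range(start_idx, len(curr_row)-1):
--                 total_sum += curr_row[k]
--                 if total_sum == j:
--                     if curr_row[k+1] != 0:
--                         return True
--                     start_idx = k+1
--                     break
--
--     return False
-- ===== SOURCE B (Python) =====
-- def rows_violated(state, rows):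
--     for curr_row, conds in zip(state, rows):
--         if sum(curr_row) > sum(conds):
--             return True
--         n = len(curr_row)
--         # prefix sums: prefix[m] = sum(curr_row[:m]), m = 0..n
--         prefix = [0]
--         for x in curr_row:
--             prefix.append(prefix[-1] + x)
--         # hash index: prefix value -> ascending list of positions m in [1, n-1]
--         buckets = {}
--         for m in range(1, n):
--             buckets.setdefault(prefix[m], []).append(m)
--         s = 0
--         for j in conds:
--             hit = None
--             for m in buckets.get(prefix[s] + j, []):
--                 if m > s:
--                     hit = m
--                     break
--             if hit is not None:
--                 if curr_row[hit] != 0: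
--                     return True
--                 s = hit
--     return False
-- ===== Notes on version B (the rewrite author's own statement) =====
-- stated objective: alternative
-- what changed: Per row, B precomputes prefix sums once and a hash index from prefix value to its ascending positions, so each condition is answered by one dictionary lookup plus a scan of its (typically tiny) bucket instead of A's fresh accumulating scan of the row per condition.
-- outside the precondition, e.g. on rows_violated([[5], [1]], [[0]]): A returns True, B returns True
import Mathlib
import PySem

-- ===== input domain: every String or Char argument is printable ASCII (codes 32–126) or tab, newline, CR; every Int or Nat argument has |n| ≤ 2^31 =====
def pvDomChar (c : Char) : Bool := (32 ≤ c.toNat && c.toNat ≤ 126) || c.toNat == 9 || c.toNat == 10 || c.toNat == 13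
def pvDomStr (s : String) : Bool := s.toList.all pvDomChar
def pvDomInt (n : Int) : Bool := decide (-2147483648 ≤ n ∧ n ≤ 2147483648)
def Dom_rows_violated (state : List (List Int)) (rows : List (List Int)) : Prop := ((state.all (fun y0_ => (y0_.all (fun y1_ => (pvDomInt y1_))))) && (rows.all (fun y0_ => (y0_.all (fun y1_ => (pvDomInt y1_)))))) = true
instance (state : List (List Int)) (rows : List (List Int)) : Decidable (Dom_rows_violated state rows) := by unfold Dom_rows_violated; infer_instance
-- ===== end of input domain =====

-- B replaces A's per-condition accumulating rescans of each row by one prefix-sum pass and a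
-- hash index from prefix value to its positions (objective: alternative algorithm, same results).

-- ===== PORT A =====
-- inner 'for k in range(start_idx, len(curr_row)-1)' accumulating total_sum:
-- none = 'return True', some none = loop fell through, some (some s') = break with start_idx = s'
def rvInner (row : List Int) (j : Int) (t : Int) (k : Nat) : Option (Option Nat) :=
  if _h : k + 1 < row.length then
    let t' := t + row.getD k 0      -- curr_row[k]; k < len-1 so always in range
    if t' = j then
      if row.getD (k + 1) 0 ≠ 0 then none else some (some (k + 1))
    else rvInner row j t' (k + 1)
  else some none
termination_by row.length - k

-- 'for j in curr_row_conditions'; true = 'return True' escaped from the inner loop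
def rvConds (row : List Int) (conds : List Int) (s : Nat) : Bool :=
  match conds with
  | [] => false
  | j :: rest =>
    match rvInner row j 0 s with
    | none => true
    | some none => rvConds row rest s
    | some (some s') => rvConds row rest s'

-- 'for i, curr_row in enumerate(state)'; rows[i] raises IndexError when i ≥ len(rows) (outside Pre_)
def rvGo (rows : List (List Int)) (state : List (List Int)) (i : Nat) : Bool :=
  match state with
  | [] => false
  | r :: rs =>
    let conds := (PySem.List.pyGet? rows (i : Int)).getD []
    if r.sum > conds.sum then true
    else if rvConds r conds 0 then true
    else rvGo rows rs (i + 1)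

def rows_violated (state : List (List Int)) (rows : List (List Int)) : Bool :=
  rvGo rows state 0

-- ===== PORT B =====
-- Source B's 'prefix = [0]; for x in curr_row: prefix.append(prefix[-1] + x)' (a left scan)
def rvPrefix (acc : Int) : List Int → List Int
  | [] => [acc]
  | x :: xs => acc :: rvPrefix (acc + x) xs

-- 'for m in range(1, n): buckets.setdefault(prefix[m], []).append(m)'
def rvBuckets (pre : List Int) (n : Nat) : PySem.Dict Int (List Nat) :=
  (List.range' 1 (n - 1)).foldl
    (fun d m => d.modify (pre.getD m 0) [] (fun l => l ++ [m])) PySem.Dict.empty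

-- 'for j in conds: hit = first m > s in buckets.get(prefix[s]+j, []); …'
def rvCondsB (row : List Int) (pre : List Int) (bk : PySem.Dict Int (List Nat))
    (conds : List Int) (s : Nat) : Bool :=
  match conds with
  | [] => false
  | j :: rest =>
    match (bk.getD (pre.getD s 0 + j) []).find? (fun m => decide (s < m)) with
    | none => rvCondsB row pre bk rest s
    | some m => if row.getD m 0 ≠ 0 then true else rvCondsB row pre bk rest m

-- 'for curr_row, conds in zip(state, rows)'
def rvGoB : List (List Int) → List (List Int) → Bool
  | [], _ => false
  | _ :: _, [] => false
  | r :: rs, c :: cs =>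
    if r.sum > c.sum then true
    else
      let pre := rvPrefix 0 r
      let bk := rvBuckets pre r.length
      if rvCondsB r pre bk c 0 then true else rvGoB rs cs

def rows_violated_alt (state : List (List Int)) (rows : List (List Int)) : Bool :=
  rvGoB state rows

-- ===== PRECONDITION & SPEC =====
-- Pre_ requires one condition list per state row (the nonogram shape). When rows is shorter,
-- A raises IndexError at the first missing index unless an earlier row already returned True;
-- to keep Pre_ closed-form it excludes that whole shape, including those early-True inputs.
def Pre_rows_violated (state : List (List Int)) (rows : List (List Int)) : Prop :=
  state.length ≤ rows.length
instance (state : List (List Int)) (rows : List (List Int)) : Decidable (Pre_rows_violated state rows) := by unfold Pre_rows_violated; infer_instance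

def pvWitness_rows_violated : List (List Int) × List (List Int) := ([[1, 0, 1]], [[1, 1]])

def Spec_rows_violated (state : List (List Int)) (rows : List (List Int)) (out : Bool) : Prop := out = rows_violated_alt state rows
instance (state : List (List Int)) (rows : List (List Int)) (out : Bool) : Decidable (Spec_rows_violated state rows out) := by unfold Spec_rows_violated; infer_instance

-- ===== CLAIM (what is proved, stated in full; the proofs are below) =====
def Claim_equal_rows_violated : Prop := ∀ (state : List (List Int)) (rows : List (List Int)), Dom_rows_violated state rows → Pre_rows_violated state rows → Spec_rows_violated state rows (rows_violated state rows)

-- ===== LEMMAS AND PROOFS =====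

theorem rvFind?_congr {α : Type} (l : List α) (p q : α → Bool)
    (h : ∀ a ∈ l, p a = q a) : l.find? p = l.find? q := by
  induction l with
  | nil => rfl
  | cons a l ih =>
    simp only [List.find?_cons]
    rw [h a (by simp)]
    cases q a
    · exact ih (fun a ha => h a (by simp [ha]))
    · rfl

-- prefix list: (rvPrefix acc row)[m] is acc plus the sum of the first m cells
theorem rvPrefix_getD (row : List Int) (acc : Int) (m : Nat) (hm : m ≤ row.length) :
    (rvPrefix acc row).getD m 0 = acc + (row.take m).sum := by
  induction row generalizing acc m with
  | nil =>
    have hm0 : m = 0 := by simpa using hm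
    subst hm0
    simp [rvPrefix]
  | cons x xs ih =>
    cases m with
    | zero => simp [rvPrefix]
    | succ m =>
      simp only [rvPrefix, List.getD_cons_succ, List.take_succ_cons, List.sum_cons]
      rw [ih (acc + x) m (by simpa using hm)]
      ring

-- the hash index: the bucket of v is exactly the positions 1 ≤ m ≤ n-1 with prefix[m] = v, ascending
theorem rvBuckets_getD (pre : List Int) (n : Nat) (v : Int) :
    (rvBuckets pre n).getD v [] =
      (List.range' 1 (n - 1)).filter (fun m => pre.getD m 0 == v) := by
  unfold rvBuckets
  have hmap : (List.range' 1 (n - 1)).foldl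
      (fun (d : PySem.Dict Int (List Nat)) m => d.modify (pre.getD m 0) [] (fun l => l ++ [m]))
      PySem.Dict.empty
      = ((List.range' 1 (n - 1)).map (fun m => (pre.getD m 0, m))).foldl
        (fun d p => d.modify p.1 [] (fun l => l ++ [p.2])) PySem.Dict.empty := by
    rw [List.foldl_map]
  rw [hmap, PySem.Dict.getD_foldl_modify_append]
  simp [List.filter_map, Function.comp_def, List.map_map]

-- one cell as a segment of the row
theorem rvTake_drop_one (row : List Int) (k : Nat) (hk : k < row.length) :
    ((row.take (k + 1)).drop k) = [row.getD k 0] := by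
  rw [List.take_succ, List.drop_append]
  have hlen : (List.take k row).length = k := by simp [Nat.le_of_lt hk]
  rw [List.drop_of_length_le (le_of_eq hlen), hlen]
  simp [List.getElem?_eq_getElem hk, List.getD_eq_getElem?_getD, List.nil_append]

theorem rvSeg_cons (row : List Int) (k m : Nat) (hk : k < row.length) (hkm : k + 1 ≤ m) :
    (row.take m).drop k = row.getD k 0 :: (row.take m).drop (k + 1) := by
  have hlt : k < (row.take m).length := by
    simp only [List.length_take]
    omega
  rw [List.drop_eq_getElem_cons hlt]
  congr 1
  rw [List.getElem_take]
  simp [List.getD_eq_getElem?_getD, List.getElem?_eq_getElem hk]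

-- A's inner loop finds the first k in [start, n-2] whose accumulated sum hits j
theorem rvInner_char (row : List Int) (j : Int) :
    ∀ d k t, d = row.length - 1 - k →
    rvInner row j t k =
      match (List.range' (k + 1) (row.length - 1 - k)).find?
          (fun m => decide (t + ((row.take m).drop k).sum = j)) with
      | none => some none
      | some m => if row.getD m 0 ≠ 0 then none else some (some m) := by
  intro d
  induction d with
  | zero =>
    intro k t hd
    rw [rvInner]
    rw [dif_neg (by omega)]
    rw [← hd]
    simp
  | succ d ih =>
    intro k t hd
    have hk1 : k + 1 < row.length := by omega
    have hkr : k < row.length := by omega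
    rw [rvInner, dif_pos hk1]
    have hrange : List.range' (k + 1) (row.length - 1 - k) =
        (k + 1) :: List.range' (k + 2) (row.length - 1 - (k + 1)) := by
      have : row.length - 1 - k = (row.length - 1 - (k + 1)) + 1 := by omega
      rw [this, List.range'_succ]
    rw [hrange]
    simp only [List.find?_cons]
    have hhead : ((row.take (k + 1)).drop k).sum = row.getD k 0 := by
      rw [rvTake_drop_one row k hkr]; simp
    by_cases hj : t + row.getD k 0 = j
    · rw [if_pos hj]
      have : (decide (t + ((row.take (k+1)).drop k).sum = j)) = true := by
        simp only [hhead, decide_eq_true_eq]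
        exact hj
      rw [this]
    · rw [if_neg hj]
      have : (decide (t + ((row.take (k+1)).drop k).sum = j)) = false := by
        simp only [hhead, decide_eq_false_iff_not]
        exact hj
      rw [this]
      rw [ih (k + 1) (t + row.getD k 0) (by omega)]
      have hcong : (List.range' (k + 2) (row.length - 1 - (k + 1))).find?
            (fun m => decide ((t + row.getD k 0) + ((row.take m).drop (k + 1)).sum = j))
          = (List.range' (k + 2) (row.length - 1 - (k + 1))).find?
            (fun m => decide (t + ((row.take m).drop k).sum = j)) := by
        apply rvFind?_congr
        intro m hm
        have hm2 : k + 2 ≤ m := (List.mem_range'_1.mp hm).1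
        rw [rvSeg_cons row k m hkr (by omega)]
        simp only [List.sum_cons, decide_eq_decide]
        constructor <;> intro h <;> linarith
      rw [hcong]

-- B's lookup finds the same first position, shifted by one (m = k + 1)
theorem rvLookup_char (row : List Int) (j : Int) (s : Nat) (hs : s ≤ row.length) :
    ((rvBuckets (rvPrefix 0 row) row.length).getD ((rvPrefix 0 row).getD s 0 + j) []).find?
        (fun m => decide (s < m))
      = (List.range' (s + 1) (row.length - 1 - s)).find?
          (fun m => decide (((row.take m).drop s).sum = j)) := by
  set n := row.length with hn
  rw [rvBuckets_getD, List.find?_filter]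
  by_cases hcase : s ≤ n - 1
  · have hsplit : List.range' 1 (n - 1) =
        List.range' 1 s ++ List.range' (s + 1) (n - 1 - s) := by
      have h := @List.range'_append 1 s (n - 1 - s) 1
      simp only [Nat.one_mul] at h
      rw [Nat.add_comm 1 s] at h
      rw [show s + (n - 1 - s) = n - 1 by omega] at h
      exact h.symm
    rw [hsplit, List.find?_append]
    have hfirst : (List.range' 1 s).find?
        (fun a => decide (((rvPrefix 0 row).getD a 0 == (rvPrefix 0 row).getD s 0 + j) = true ∧ decide (s < a) = true)) = none := by
      rw [List.find?_eq_none]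
      intro m hm
      have h2 := (List.mem_range'_1.mp hm).2
      simp only [decide_eq_true_eq, not_and]
      intro _
      omega
    rw [hfirst, Option.none_or]
    apply rvFind?_congr
    intro m hm
    obtain ⟨hm1, hm2⟩ := List.mem_range'_1.mp hm
    have hms : s + 1 ≤ m := hm1
    have hmn : m ≤ n := by omega
    rw [rvPrefix_getD row 0 m hmn, rvPrefix_getD row 0 s hs]
    have hsum : (row.take m).sum = (row.take s).sum + ((row.take m).drop s).sum := by
      have hts : (row.take m).take s = row.take s := by
        rw [List.take_take]
        congr 1
        omega
      conv_lhs => rw [← List.take_append_drop s (row.take m)]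
      rw [List.sum_append, hts]
    simp only [decide_eq_true_eq, beq_iff_eq]
    have hlt : (s < m) := by omega
    simp only [hlt, and_true]
    rw [decide_eq_decide]
    omega
  · -- s = n (and n ≥ 1): nothing to find on either side
    have hsn : s = n := by omega
    have hleft : (List.range' 1 (n - 1)).find?
        (fun a => decide (((rvPrefix 0 row).getD a 0 == (rvPrefix 0 row).getD s 0 + j) = true ∧ decide (s < a) = true)) = none := by
      rw [List.find?_eq_none]
      intro m hm
      have h2 := (List.mem_range'_1.mp hm).2
      simp only [decide_eq_true_eq, not_and]
      intro _
      omega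
    have hright : row.length - 1 - s = 0 := by omega
    rw [hleft, hright]
    simp

-- the two per-row condition loops agree
theorem rvConds_eq (row : List Int) :
    ∀ conds s, s ≤ row.length →
    rvConds row conds s
      = rvCondsB row (rvPrefix 0 row) (rvBuckets (rvPrefix 0 row) row.length) conds s := by
  intro conds
  induction conds with
  | nil => intro s _; rfl
  | cons j rest ih =>
    intro s hs
    simp only [rvConds, rvCondsB]
    rw [rvInner_char row j (row.length - 1 - s) s 0 rfl, rvLookup_char row j s hs]
    have hz : (List.range' (s + 1) (row.length - 1 - s)).find?
          (fun m => decide (0 + ((row.take m).drop s).sum = j))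
        = (List.range' (s + 1) (row.length - 1 - s)).find?
          (fun m => decide (((row.take m).drop s).sum = j)) := by
      apply rvFind?_congr; intro a _; simp
    rw [hz]
    cases hfind : (List.range' (s + 1) (row.length - 1 - s)).find?
        (fun m => decide (((row.take m).drop s).sum = j)) with
    | none => exact ih s hs
    | some m =>
      have hmem := List.mem_of_find?_eq_some hfind
      have hm2 : m ≤ row.length := by
        have := (List.mem_range'_1.mp hmem).2
        omega
      show (match (if row.getD m 0 ≠ 0 then none else some (some m) : Option (Option Nat)) with
          | none => true
          | some none => rvConds row rest s
          | some (some s') => rvConds row rest s')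
          = (if row.getD m 0 ≠ 0 then true
             else rvCondsB row (rvPrefix 0 row) (rvBuckets (rvPrefix 0 row) row.length) rest m)
      by_cases hv : row.getD m 0 ≠ 0
      · rw [if_pos hv, if_pos hv]
      · rw [if_neg hv, if_neg hv]
        exact ih m hm2

-- the outer loops agree: A's index i into rows matches B's zip over the remaining rows
theorem rvGo_eq (state : List (List Int)) :
    ∀ rows (i : Nat), i + state.length ≤ rows.length →
    rvGo rows state i = rvGoB state (rows.drop i) := by
  induction state with
  | nil => intro rows i _; cases rows.drop i <;> rfl
  | cons r rs ih =>
    intro rows i hlen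
    have hi : i < rows.length := by simp at hlen; omega
    have hdrop : rows.drop i = rows[i] :: rows.drop (i + 1) := List.drop_eq_getElem_cons hi
    rw [rvGo, hdrop, rvGoB]
    have hget : (PySem.List.pyGet? rows (i : Int)).getD [] = rows[i] := by
      rw [PySem.List.pyGet?_natCast]
      simp [List.getElem?_eq_getElem hi]
    rw [hget]
    by_cases hsum : r.sum > rows[i].sum
    · simp [hsum]
    · simp only [hsum, if_false]
      rw [rvConds_eq r rows[i] 0 (Nat.zero_le _)]
      by_cases hc : rvCondsB r (rvPrefix 0 r) (rvBuckets (rvPrefix 0 r) r.length) rows[i] 0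
      · simp [hc]
      · simp only [hc, Bool.false_eq_true, if_false]
        exact ih rows (i + 1) (by simp at hlen ⊢; omega)

-- ===== VERDICT (by name: the statement is the Claim_ definition above) =====
theorem rows_violated_spec : Claim_equal_rows_violated := by
  intro state rows _ hpre
  unfold Spec_rows_violated rows_violated rows_violated_alt
  have := rvGo_eq state rows 0 (by simpa using hpre)
  simpa using this
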